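-- pv_equiv track=rewrite | github.com/neal-o-r/pangram | pangram_bitmask.py | traverse_dag
-- ===== SOURCE A (Python) =====
-- def traverse_dag(target, dag):
--     """
--     walk the dag from index 0 until we git the target,
--     or'ing out the words at each step so we end up with a list
--     of ints encoding the words.
--     """
--     state = i = 0
--     words = []
--
--     while i != target:
--         words.append(state ^ dag[i])
--         i = dag[i]
--         state = i | state
--
--     return words
-- ===== SOURCE B (Python) =====
-- def traverse_dag(target, dag):
--     # Recursive decomposition: `chain` builds the list of nodes visited after
--     # index 0, front-first by recursion; `encode` recursively turns it into the
--     # XOR-delta encoding while threading the OR state.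
--     def chain(i):
--         if i == target:
--             return []
--         return [dag[i]] + chain(dag[i])
--
--     def encode(state, ns):
--         if not ns:
--             return []
--         return [state ^ ns[0]] + encode(state | ns[0], ns[1:])
--
--     return encode(0, chain(0))
-- ===== Notes on version B (the rewrite author's own statement) =====
-- stated objective: alternative
-- what changed: Replaces A's single imperative while-loop with two recursive helpers: chain recursively discovers the list of visited nodes front-first, and encode recursively folds the OR state over that list to emit the XOR deltas.
import Mathlib
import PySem

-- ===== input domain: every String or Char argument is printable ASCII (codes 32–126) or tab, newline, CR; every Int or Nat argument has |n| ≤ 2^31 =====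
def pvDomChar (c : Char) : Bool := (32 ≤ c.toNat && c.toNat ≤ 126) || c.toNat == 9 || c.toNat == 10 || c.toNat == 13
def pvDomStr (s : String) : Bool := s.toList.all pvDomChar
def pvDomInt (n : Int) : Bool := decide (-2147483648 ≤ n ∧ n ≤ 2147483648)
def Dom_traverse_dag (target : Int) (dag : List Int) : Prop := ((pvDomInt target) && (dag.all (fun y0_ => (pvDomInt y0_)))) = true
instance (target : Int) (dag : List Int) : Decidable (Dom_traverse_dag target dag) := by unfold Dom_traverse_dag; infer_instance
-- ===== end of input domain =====

-- ===== PORT A =====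
-- B is a recursive decomposition of A's single loop; return values agree on Pre_.
-- fuel 2*|dag|+1 bounds the loop: the loop head only revisits indices in [-|dag|,|dag|), so a longer
-- chain repeats a state and the Python diverges (such inputs are outside Pre_).
def goA (target : Int) (dag : List Int) : Nat → Int → Int → List Int → List Int
  | 0, _, _, words => words.reverse
  | fuel+1, state, i, words =>
    if i = target then words.reverse
    else match PySem.List.pyGet? dag i with
      | none => words.reverse      -- IndexError in Python; outside Pre_
      | some v => goA target dag fuel (PySem.Int.bor v state) v ((PySem.Int.bxor state v) :: words)

def traverse_dag (target : Int) (dag : List Int) : List Int :=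
  goA target dag (2 * dag.length + 1) 0 0 []

-- ===== PORT B =====
def chainB (target : Int) (dag : List Int) : Nat → Int → List Int
  | 0, _ => []
  | fuel+1, i =>
    if i = target then []
    else match PySem.List.pyGet? dag i with
      | none => []                 -- IndexError in Python; outside Pre_
      | some v => [v] ++ chainB target dag fuel v

def encodeB : Int → List Int → List Int
  | _, [] => []
  | state, n :: rest => [PySem.Int.bxor state n] ++ encodeB (PySem.Int.bor state n) rest

def traverse_dag_alt (target : Int) (dag : List Int) : List Int :=
  encodeB 0 (chainB target dag (2 * dag.length + 1) 0)

-- ===== PRECONDITION & SPEC =====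
-- Pre_ holds exactly when A's while loop terminates normally: following the links from index 0
-- (Python's negative-index rule; a step out of range yields none) the chain reaches target within
-- 2*|dag| steps.  That bound is forced: the loop head only ever sits on one of the 2*|dag| valid
-- indices, so a longer chain repeats one and Python diverges.  Excluded inputs are exactly those
-- where Python raises IndexError or diverges.
def stepP (dag : List Int) : Option Int → Option Int
  | none => none
  | some i => PySem.List.pyGet? dag i

def Pre_traverse_dag (target : Int) (dag : List Int) : Prop :=
  ∃ k ≤ 2 * dag.length, (stepP dag)^[k] (some 0) = some target
instance (target : Int) (dag : List Int) : Decidable (Pre_traverse_dag target dag) := by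
  unfold Pre_traverse_dag; infer_instance

def pvWitness_traverse_dag : Int × List Int := (2, [1, 2, 0])

def Spec_traverse_dag (target : Int) (dag : List Int) (out : List Int) : Prop := out = traverse_dag_alt target dag
instance (target : Int) (dag : List Int) (out : List Int) : Decidable (Spec_traverse_dag target dag out) := by unfold Spec_traverse_dag; infer_instance

-- ===== CLAIM (what is proved, stated in full; the proofs are below) =====
def Claim_equal_traverse_dag : Prop := ∀ (target : Int) (dag : List Int), Dom_traverse_dag target dag → Pre_traverse_dag target dag → Spec_traverse_dag target dag (traverse_dag target dag)

-- ===== LEMMAS AND PROOFS =====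
theorem goA_encode (target : Int) (dag : List Int) (fuel : Nat) :
    ∀ (state i : Int) (words : List Int),
      goA target dag fuel state i words
        = words.reverse ++ encodeB state (chainB target dag fuel i) := by
  induction fuel with
  | zero => intro state i words; simp [goA, chainB, encodeB]
  | succ fuel ih =>
    intro state i words
    simp only [goA, chainB]
    split
    · simp [encodeB]
    · cases h : PySem.List.pyGet? dag i with
      | none => simp [encodeB]
      | some v =>
        simp only [ih (PySem.Int.bor v state) v ((PySem.Int.bxor state v) :: words)]
        simp [encodeB, PySem.Int.bor_comm]

-- ===== VERDICT (by name: the statement is the Claim_ definition above) =====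
theorem traverse_dag_spec : Claim_equal_traverse_dag := by
  intro target dag _ _
  unfold Spec_traverse_dag traverse_dag traverse_dag_alt
  rw [goA_encode]
  simp
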